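-- pv_equiv track=rewrite | github.com/Goutamparsniya/Real-time-Chat-Application | p3.py | can_become_empty
-- ===== SOURCE A (Python) =====
-- def can_become_empty(s):
--     def is_empty(substring):
--         if not substring:
--             return True
--         return False
--     for i in range(len(s)):
--         substring = s[:i] + s[i+1:]
--         if is_empty(substring) or can_become_empty(substring):
--             return True
--     return False
-- ===== SOURCE B (Python) =====
-- def can_become_empty(s):
--     # Removing characters one at a time can always reach the empty string
--     # iff s is non-empty; the empty string itself yields False (loop never runs in A).
--     return len(s) > 0
-- ===== Notes on version B (the rewrite author's own statement) =====
-- stated objective: faster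
-- what changed: Replaced the factorial-time recursive deletion search by the closed form len(s) > 0, since any non-empty string can always be reduced to empty.
import Mathlib
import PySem

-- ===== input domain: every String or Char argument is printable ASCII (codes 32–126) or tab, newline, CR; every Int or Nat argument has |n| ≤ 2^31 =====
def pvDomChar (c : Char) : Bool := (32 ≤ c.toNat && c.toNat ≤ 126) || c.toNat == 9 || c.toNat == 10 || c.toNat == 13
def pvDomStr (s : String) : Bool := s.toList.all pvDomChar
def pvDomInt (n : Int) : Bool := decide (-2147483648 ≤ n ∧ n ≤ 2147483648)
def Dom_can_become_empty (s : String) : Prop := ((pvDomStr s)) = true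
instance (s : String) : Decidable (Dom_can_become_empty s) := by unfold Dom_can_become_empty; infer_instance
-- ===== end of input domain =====

-- B replaces A's factorial-time recursive deletion search by the closed form len(s) > 0.

-- ===== PORT A =====
-- A's recursive search over all single-character deletions, on the char list.
-- s[:i] + s[i+1:] with 0 ≤ i < len(s) is exactly l.take i ++ l.drop (i+1) (nonnegative,
-- in-range slice indices, so the Python slices equal take/drop here).
def canAList (l : List Char) : Bool :=
  -- 'for i in range(len(s)): … if cond: return True / return False' = any over range(len(s))
  (List.range l.length).attach.any (fun ⟨i, hi⟩ =>
    let substring := l.take i ++ l.drop (i+1)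
    (substring.isEmpty || canAList substring))
termination_by l.length
decreasing_by
  simp only [List.mem_range] at hi
  simp [List.length_take, List.length_drop]
  omega

def can_become_empty (s : String) : Bool := canAList s.toList

-- ===== PORT B =====
-- B: return len(s) > 0
def can_become_empty_alt (s : String) : Bool := decide (0 < s.toList.length)

-- ===== PRECONDITION & SPEC =====
def Spec_can_become_empty (s : String) (out : Bool) : Prop := out = can_become_empty_alt s
instance (s : String) (out : Bool) : Decidable (Spec_can_become_empty s out) := by unfold Spec_can_become_empty; infer_instance

-- ===== CLAIM (what is proved, stated in full; the proofs are below) =====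
def Claim_equal_can_become_empty : Prop := ∀ (s : String), Dom_can_become_empty s → Spec_can_become_empty s (can_become_empty s)

-- ===== LEMMAS AND PROOFS =====
theorem canAList_nil : canAList [] = false := by
  unfold canAList; simp

theorem canAList_eq (l : List Char) : canAList l = decide (0 < l.length) := by
  induction l with
  | nil => simp [canAList_nil]
  | cons a t ih =>
    unfold canAList
    rw [List.any_eq_true.mpr]
    · simp
    · refine ⟨⟨0, ?_⟩, List.mem_attach _ _, ?_⟩
      · simp
      · simp only [List.take_zero, List.drop_succ_cons, List.drop_zero, List.nil_append]
        cases t with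
        | nil => simp
        | cons b u => simp [ih]

-- ===== VERDICT (by name: the statement is the Claim_ definition above) =====
theorem can_become_empty_spec : Claim_equal_can_become_empty := by
  intro s _
  unfold Spec_can_become_empty can_become_empty can_become_empty_alt
  exact canAList_eq s.toList
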